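-- pv_equiv track=rewrite | github.com/bacadra/bacadra | bacadra/unise/udict.py | dsub
-- ===== SOURCE A (Python) =====
-- def clear_empty(o1):
--     for key, val in o1.copy().items():
--         if o1[key] == 0: o1.pop(key)
--
-- def dsub(o1, o2):
--     '''
--     Wzajemne odejmowanie wartosci w slownikach.
--     '''
--     onew = o1.copy()
--     for key, val in o2.items():
--         try:
--             onew[key] -= val
--         except:
--             onew.update({key:-val})
--     clear_empty(onew)
--     return onew
-- ===== SOURCE B (Python) =====
-- def dsub(o1, o2):
--     # One pass over the union of keys (o1 order, then o2-only keys in o2 order),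
--     # building the result fresh with zero-filtering inline; no mutation of o1/o2.
--     out = {}
--     for key in {**o1, **o2}:
--         val = o1.get(key, 0) - o2.get(key, 0)
--         if val != 0:
--             out[key] = val
--     return out
-- ===== Notes on version B (the rewrite author's own statement) =====
-- stated objective: simpler
-- what changed: Replaces copy-then-mutate-then-separate-zero-sweep with a single pass over the union of keys that computes o1.get(k,0)-o2.get(k,0) and filters zeros inline, building the result dict fresh.
import Mathlib
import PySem

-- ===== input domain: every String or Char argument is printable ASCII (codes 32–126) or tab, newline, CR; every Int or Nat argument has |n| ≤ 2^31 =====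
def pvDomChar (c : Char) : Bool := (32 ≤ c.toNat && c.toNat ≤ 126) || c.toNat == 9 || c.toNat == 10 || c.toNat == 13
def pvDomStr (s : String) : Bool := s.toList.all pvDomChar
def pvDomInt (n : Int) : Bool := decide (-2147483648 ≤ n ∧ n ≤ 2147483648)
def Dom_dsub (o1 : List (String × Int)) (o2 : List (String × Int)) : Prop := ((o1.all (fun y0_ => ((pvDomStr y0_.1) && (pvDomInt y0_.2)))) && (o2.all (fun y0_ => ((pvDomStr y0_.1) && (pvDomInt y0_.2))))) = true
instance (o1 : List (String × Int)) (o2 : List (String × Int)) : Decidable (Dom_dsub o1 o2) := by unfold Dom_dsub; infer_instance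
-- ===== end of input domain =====

-- B builds the result in one pass over the union of keys with inline zero-filtering,
-- instead of A's copy-then-mutate-then-separate-zero-sweep (objective: simpler).

-- ===== PORT A =====
-- onew = o1.copy(); for key, val in o2.items(): try onew[key] -= val; except: onew.update({key:-val})
-- With Int values the only exception is the KeyError of the lookup, modelled by get? = none.
-- clear_empty: for key, val in onew.copy().items(): if onew[key] == 0: onew.pop(key)
-- (the indexing onew[key] always succeeds: dict keys are distinct, so the key checked was never popped)
def dsub (o1 : List (String × Int)) (o2 : List (String × Int)) : List (String × Int) :=
  let onew0 : PySem.Dict String Int := PySem.Dict.ofList o1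
  let d2 : PySem.Dict String Int := PySem.Dict.ofList o2
  let onew1 := d2.items.foldl (fun on kv =>
      match on.get? kv.1 with
      | some v => on.insert kv.1 (v - kv.2)
      | none   => on.insert kv.1 (-kv.2)) onew0
  let onew2 := onew1.items.foldl (fun on kv =>
      if on.getD kv.1 0 = 0 then on.erase kv.1 else on) onew1
  onew2.items

-- ===== PORT B =====
-- out = {}; for key in {**o1, **o2}: val = o1.get(key,0) - o2.get(key,0); if val != 0: out[key] = val
def dsub_alt (o1 : List (String × Int)) (o2 : List (String × Int)) : List (String × Int) :=
  let d1 : PySem.Dict String Int := PySem.Dict.ofList o1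
  let d2 : PySem.Dict String Int := PySem.Dict.ofList o2
  let out := ((d1.update o2).keys).foldl (fun out k =>
      let v := d1.getD k 0 - d2.getD k 0
      if v ≠ 0 then out.insert k v else out) (PySem.Dict.empty : PySem.Dict String Int)
  out.items

-- ===== PRECONDITION & SPEC =====
def Spec_dsub (o1 : List (String × Int)) (o2 : List (String × Int)) (out : List (String × Int)) : Prop := out = dsub_alt o1 o2
instance (o1 : List (String × Int)) (o2 : List (String × Int)) (out : List (String × Int)) : Decidable (Spec_dsub o1 o2 out) := by unfold Spec_dsub; infer_instance

-- ===== CLAIM (what is proved, stated in full; the proofs are below) =====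
def Claim_equal_dsub : Prop := ∀ (o1 : List (String × Int)) (o2 : List (String × Int)), Dom_dsub o1 o2 → Spec_dsub o1 o2 (dsub o1 o2)

-- ===== LEMMAS AND PROOFS =====

-- A's subtract loop is pointwise an insert of (old value, default 0) - val
lemma stepA_eq_insStep (on : PySem.Dict String Int) (kv : String × Int) :
    (match on.get? kv.1 with
     | some v => on.insert kv.1 (v - kv.2)
     | none   => on.insert kv.1 (-kv.2)) = on.insert kv.1 (on.getD kv.1 0 - kv.2) := by
  cases h : on.get? kv.1 <;> simp [PySem.Dict.getD_eq_get?_getD, h]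

lemma foldl_insStep_getD_of_not_mem (l : List (String × Int)) (d : PySem.Dict String Int)
    (k : String) (hk : k ∉ l.map (·.1)) :
    (l.foldl (fun on kv => on.insert kv.1 (on.getD kv.1 0 - kv.2)) d).getD k 0 = d.getD k 0 := by
  induction l generalizing d with
  | nil => rfl
  | cons kv rest ih =>
      simp only [List.map_cons, List.mem_cons, not_or] at hk
      simp only [List.foldl_cons]
      rw [ih _ hk.2, PySem.Dict.getD_insert_of_ne _ _ _ hk.1]

lemma foldl_insStep_getD_of_mem (l : List (String × Int)) (d : PySem.Dict String Int)
    (kv : String × Int) (hnd : (l.map (·.1)).Nodup) (hkv : kv ∈ l) :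
    (l.foldl (fun on kv => on.insert kv.1 (on.getD kv.1 0 - kv.2)) d).getD kv.1 0
      = d.getD kv.1 0 - kv.2 := by
  induction l generalizing d with
  | nil => cases hkv
  | cons hd rest ih =>
      simp only [List.map_cons, List.nodup_cons] at hnd
      rcases List.mem_cons.mp hkv with h | h
      · subst h
        simp only [List.foldl_cons]
        rw [foldl_insStep_getD_of_not_mem _ _ _ hnd.1, PySem.Dict.getD_insert_self]
      · have hne : kv.1 ≠ hd.1 := by
          intro he
          exact hnd.1 (he ▸ List.mem_map_of_mem h)
        simp only [List.foldl_cons]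
        rw [ih _ hnd.2 h, PySem.Dict.getD_insert_of_ne _ _ _ hne]

-- value of A's dict after the subtract loop: uniformly d1[k] (default 0) - d2[k] (default 0)
lemma onew1_getD (o1 o2 : List (String × Int)) (k : String) :
    ((PySem.Dict.ofList o2).items.foldl (fun on kv => on.insert kv.1 (on.getD kv.1 0 - kv.2))
        (PySem.Dict.ofList o1)).getD k 0
      = (PySem.Dict.ofList o1).getD k 0 - (PySem.Dict.ofList o2).getD k 0 := by
  cases h : (PySem.Dict.ofList o2).get? k with
  | none =>
      have hk : k ∉ (PySem.Dict.ofList o2).items.map (·.1) :=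
        (PySem.Dict.get?_eq_none_iff_not_mem_keys _ _).mp h
      rw [foldl_insStep_getD_of_not_mem _ _ _ hk,
        PySem.Dict.getD_eq_get?_getD (PySem.Dict.ofList o2) k 0, h]
      simp
  | some w =>
      have hm : (k, w) ∈ (PySem.Dict.ofList o2).items :=
        PySem.Dict.mem_items_of_get?_eq_some _ h
      have := foldl_insStep_getD_of_mem (PySem.Dict.ofList o2).items (PySem.Dict.ofList o1)
        (k, w) (PySem.Dict.nodup_keys_ofList o2) hm
      rw [this, PySem.Dict.getD_eq_get?_getD (PySem.Dict.ofList o2) k 0, h]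
      rfl

-- find? commutes past an erase of a DIFFERENT key (raw list form)
lemma find?_filter_ne_key (l : List (String × Int)) (k k' : String) (hne : k' ≠ k) :
    (l.filter (fun p => !(p.1 == k))).find? (fun p => p.1 == k')
      = l.find? (fun p => p.1 == k') := by
  induction l with
  | nil => rfl
  | cons hd rest ih =>
      by_cases h1 : hd.1 = k
      · subst h1
        have : (hd.1 == k') = false := by simp; exact fun he => hne he.symm
        simp [this, ih]
      · by_cases h2 : hd.1 = k'
        · simp [h2, hne]
        · simp [h1, h2, ih]

lemma get?_erase_of_ne (d : PySem.Dict String Int) (k k' : String) (hne : k' ≠ k) :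
    (d.erase k).get? k' = d.get? k' := by
  simp only [PySem.Dict.get?, PySem.Dict.erase]
  rw [find?_filter_ne_key _ _ _ hne]

-- the clear_empty sweep: from a dict whose entries processed so far are exactly l,
-- it keeps precisely the entries whose key is not (in l with value 0)
lemma sweep_items (l : List (String × Int)) (d : PySem.Dict String Int)
    (hnd : d.keys.Nodup) (hl : ∀ kv ∈ l, d.get? kv.1 = some kv.2)
    (hlk : (l.map (·.1)).Nodup) :
    (l.foldl (fun on kv => if on.getD kv.1 0 = 0 then on.erase kv.1 else on) d).items
      = d.items.filter (fun p => !(decide (p.2 = 0) && decide (p.1 ∈ l.map (·.1)))) := by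
  induction l generalizing d with
  | nil => simp
  | cons kv rest ih =>
      simp only [List.map_cons, List.nodup_cons] at hlk
      have hget : d.get? kv.1 = some kv.2 := hl kv (List.mem_cons_self ..)
      have hgetD : d.getD kv.1 0 = kv.2 := by
        rw [PySem.Dict.getD_eq_get?_getD, hget]; rfl
      simp only [List.foldl_cons, hgetD]
      by_cases h0 : kv.2 = 0
      · rw [if_pos h0]
        have hnd' : (d.erase kv.1).keys.Nodup := by
          simp only [PySem.Dict.erase]
          exact (List.Sublist.map _ List.filter_sublist).nodup hnd
        have hl' : ∀ p ∈ rest, (d.erase kv.1).get? p.1 = some p.2 := by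
          intro p hp
          have hne : p.1 ≠ kv.1 := fun he => hlk.1 (he ▸ List.mem_map_of_mem hp)
          rw [get?_erase_of_ne _ _ _ hne]
          exact hl p (List.mem_cons_of_mem _ hp)
        rw [ih _ hnd' hl' hlk.2]
        simp only [PySem.Dict.erase, List.filter_filter]
        apply List.filter_congr
        intro p hp
        by_cases hpk : p.1 = kv.1
        · -- the entry with key kv.1 has value kv.2 = 0 (keys are Nodup), removed on both sides
          have : d.get? p.1 = some p.2 := PySem.Dict.get?_of_mem_items d hp hnd
          rw [hpk] at this
          rw [hget] at this
          have hpv : p.2 = 0 := by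
            have := Option.some.inj this
            omega
          simp [hpk, hpv]
        · by_cases hm : p.1 ∈ rest.map (·.1) <;> simp [hm, hpk, List.mem_cons]
      · rw [if_neg h0]
        rw [ih _ hnd (fun kv h => hl kv (List.mem_cons_of_mem _ h)) hlk.2]
        apply List.filter_congr
        intro p hp
        by_cases hpk : p.1 = kv.1
        · have : d.get? p.1 = some p.2 := PySem.Dict.get?_of_mem_items d hp hnd
          rw [hpk, hget] at this
          have hpv : p.2 = kv.2 := (Option.some.inj this).symm
          simp [hpk, hpv, h0]
        · by_cases hm : p.1 ∈ rest.map (·.1) <;> simp [hm, hpk, List.mem_cons]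

-- updating a set with the distinct elements of xs is updating it with xs
lemma set_update_ofList (s : PySem.Set String) (xs : List String) :
    PySem.Set.update s (PySem.Set.ofList xs) = PySem.Set.update s xs := by
  rw [PySem.Set.update_eq_append_filter, PySem.Set.update_eq_append_filter,
    PySem.Set.ofList_ofList]

-- keys of a dict built from a pair list are the distinct first components
lemma keys_ofList (ps : List (String × Int)) :
    (PySem.Dict.ofList (κ := String) ps).keys = PySem.Set.ofList (ps.map (·.1)) := by
  have := PySem.Dict.keys_foldl_insert_key (ν := Int) ps (·.1)
    (fun _ p => p.2) PySem.Dict.empty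
  simpa [PySem.Dict.ofList, PySem.Dict.update, PySem.Set.update_empty] using this

-- B's loop over distinct fresh keys appends exactly the nonzero entries
lemma b_loop_items (K : List String) (f : String → Int) (out : PySem.Dict String Int)
    (hK : K.Nodup) (hfresh : ∀ k ∈ K, out.contains k = false) :
    (K.foldl (fun out k => if f k ≠ 0 then out.insert k (f k) else out) out).items
      = out.items ++ (K.filter (fun k => decide (f k ≠ 0))).map (fun k => (k, f k)) := by
  induction K generalizing out with
  | nil => simp
  | cons k rest ih =>
      simp only [List.nodup_cons] at hK
      have hfk : out.contains k = false := hfresh k (List.mem_cons_self ..)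
      by_cases h0 : f k ≠ 0
      · have hfresh' : ∀ k' ∈ rest, (out.insert k (f k)).contains k' = false := by
          intro k' hk'
          rw [PySem.Dict.contains_insert]
          have : k' ≠ k := fun he => hK.1 (he ▸ hk')
          simp [this, hfresh k' (List.mem_cons_of_mem _ hk')]
        simp only [List.foldl_cons, if_pos h0, List.filter_cons]
        rw [ih _ hK.2 hfresh', PySem.Dict.items_insert_of_not_contains _ _ hfk]
        simp [h0]
      · simp only [List.foldl_cons, if_neg h0, List.filter_cons]
        simp only [ne_eq, not_not] at h0
        rw [ih _ hK.2 (fun k' h => hfresh k' (List.mem_cons_of_mem _ h))]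
        simp [h0]

-- ===== VERDICT (by name: the statement is the Claim_ definition above) =====
theorem dsub_spec : Claim_equal_dsub := by
  intro o1 o2 _
  unfold Spec_dsub dsub dsub_alt
  set d1 := PySem.Dict.ofList o1 with hd1
  set d2 := PySem.Dict.ofList o2 with hd2
  -- the common value function and the common union key list
  set f : String → Int := fun k => d1.getD k 0 - d2.getD k 0 with hf
  have hstep : (fun (on : PySem.Dict String Int) (kv : String × Int) =>
      match on.get? kv.1 with
      | some v => on.insert kv.1 (v - kv.2)
      | none   => on.insert kv.1 (-kv.2))
      = fun on kv => on.insert kv.1 (on.getD kv.1 0 - kv.2) := by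
    funext on kv; exact stepA_eq_insStep on kv
  simp only [hstep]
  set onew1 := d2.items.foldl (fun on kv => on.insert kv.1 (on.getD kv.1 0 - kv.2)) d1 with ho1
  have hU : onew1.keys = PySem.Set.update d1.keys (o2.map (·.1)) := by
    rw [ho1, PySem.Dict.keys_foldl_insert_key d2.items (·.1) (fun on kv => on.getD kv.1 0 - kv.2) d1]
    show PySem.Set.update d1.keys d2.keys = _
    rw [hd2, keys_ofList o2, set_update_ofList]
  set U := PySem.Set.update d1.keys (o2.map (·.1)) with hUdef
  have hUnodup : U.Nodup := PySem.Set.nodup_update _ _ (PySem.Dict.nodup_keys_ofList o1)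
  have hnd1 : onew1.keys.Nodup := by rw [hU]; exact hUnodup
  have hval : ∀ k, onew1.getD k 0 = f k := fun k => onew1_getD o1 o2 k
  -- A's dict after the loop, as a list
  have hitems : onew1.items = U.map (fun k => (k, f k)) := by
    rw [PySem.Dict.items_eq_map_keys onew1 hnd1 0, hU]
    exact List.map_congr_left (fun k _ => by rw [hval k])
  -- the sweep filters out the zero entries
  have hsweep := sweep_items onew1.items onew1 hnd1
    (fun kv h => PySem.Dict.get?_of_mem_items onew1 h hnd1)
    (by show onew1.keys.Nodup; exact hnd1)
  rw [hsweep]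
  have hmemkeys : ∀ p ∈ onew1.items, p.1 ∈ onew1.items.map (·.1) :=
    fun p hp => List.mem_map_of_mem hp
  rw [List.filter_congr (fun p hp => by simp [hmemkeys p hp])
    (q := fun p => !decide (p.2 = 0))]
  -- B's union key list is the same U
  have hBU : (d1.update o2).keys = U := by
    rw [PySem.Dict.update,
      PySem.Dict.keys_foldl_insert_key o2 (·.1) (fun on kv => kv.2) d1]
  rw [hBU, b_loop_items U f PySem.Dict.empty hUnodup (fun k _ => rfl)]
  rw [hitems, List.filter_map]
  simp only [PySem.Dict.empty, List.nil_append]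
  apply congrArg
  apply List.filter_congr
  intro k _
  simp
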